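-- pv_equiv track=rewrite | github.com/dennis2030/leetcodeStudyGroup | GoogleCodeJam2018/qualification/saving-the-universe-again/john.py | calc_damage
-- ===== SOURCE A (Python) =====
-- def calc_damage(codes):
--     power = 1
--     total_damage = 0
--     for code in codes:
--         if code == 'C':
--             power *= 2
--         elif code == 'S':
--             total_damage += power
--         else:
--             raise Exception()
--     return total_damage
-- ===== SOURCE B (Python) =====
-- def calc_damage(codes):
--     # Group the instruction list into runs of 'S' separated by 'C':
--     # segment i has seen i doublings, so each shot there deals 1 << i damage.
--     segments = []
--     cur = 0
--     for code in codes: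
--         if code == 'C':
--             segments.append(cur)
--             cur = 0
--         elif code == 'S':
--             cur += 1
--         else:
--             raise Exception()
--     segments.append(cur)
--     return sum(n << i for i, n in enumerate(segments))
-- ===== Notes on version B (the rewrite author's own statement) =====
-- stated objective: alternative
-- what changed: B groups the instructions into 'S'-run lengths between 'C's and computes the total as a positionally weighted sum sum(len_i << i), instead of A's char-by-char scan carrying a running power.
import Mathlib
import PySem

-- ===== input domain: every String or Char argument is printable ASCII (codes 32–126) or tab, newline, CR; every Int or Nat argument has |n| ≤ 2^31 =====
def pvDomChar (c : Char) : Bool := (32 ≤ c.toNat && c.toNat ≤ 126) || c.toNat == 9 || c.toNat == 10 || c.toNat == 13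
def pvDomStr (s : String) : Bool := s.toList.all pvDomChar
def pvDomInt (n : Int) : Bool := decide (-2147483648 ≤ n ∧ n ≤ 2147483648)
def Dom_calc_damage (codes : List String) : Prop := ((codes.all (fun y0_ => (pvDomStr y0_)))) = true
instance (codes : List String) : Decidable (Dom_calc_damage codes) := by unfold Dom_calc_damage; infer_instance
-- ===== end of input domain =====

-- B groups the instructions into 'S'-run lengths between 'C's and computes the total
-- as a positionally weighted sum Σ len_i * 2^i, instead of A's running-power scan.

-- ===== PORT A =====
-- A's loop over codes carrying (power, total_damage); the 'else' branch raises in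
-- Python and is excluded by Pre_calc_damage (the port leaves the state unchanged there).
def calc_damage (codes : List String) : Int :=
  (codes.foldl (fun (st : Int × Int) code =>
    if code = "C" then (st.1 * 2, st.2)
    else if code = "S" then (st.1, st.2 + st.1)
    else st) ((1 : Int), (0 : Int))).2

-- ===== PORT B =====
-- B's first loop: run lengths of 'S' between 'C's (the trailing run included);
-- the 'else' branch raises in Python (outside Pre_calc_damage); the port skips the element.
def segmentsOf : List String → Int → List Int
  | [], cur => [cur]
  | code :: rest, cur =>
      if code = "C" then cur :: segmentsOf rest 0
      else if code = "S" then segmentsOf rest (cur + 1)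
      else segmentsOf rest cur

-- B's final sum: sum(n << i for i, n in enumerate(segments))
def calc_damage_alt (codes : List String) : Int :=
  ((PySem.List.enumerate (segmentsOf codes 0) 0).map (fun p => p.2 * 2 ^ p.1.toNat)).sum

-- ===== PRECONDITION & SPEC =====
-- Pre_ excludes exactly the inputs on which A (and B) raise Exception():
-- any element other than "C" or "S".
def Pre_calc_damage (codes : List String) : Prop :=
  ∀ code ∈ codes, code = "C" ∨ code = "S"
instance (codes : List String) : Decidable (Pre_calc_damage codes) := by
  unfold Pre_calc_damage; infer_instance

def pvWitness_calc_damage : List String := ["S", "C", "S", "S", "C", "S"]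

def Spec_calc_damage (codes : List String) (out : Int) : Prop := out = calc_damage_alt codes
instance (codes : List String) (out : Int) : Decidable (Spec_calc_damage codes out) := by
  unfold Spec_calc_damage; infer_instance

-- ===== CLAIM (what is proved, stated in full; the proofs are below) =====
def Claim_equal_calc_damage : Prop :=
  ∀ (codes : List String), Dom_calc_damage codes → Pre_calc_damage codes →
    Spec_calc_damage codes (calc_damage codes)

-- ===== LEMMAS AND PROOFS =====

-- proof-only helper: weighted sum of segments with a running power (doubling each step)
def sumW : List Int → Int → Int
  | [], _ => 0
  | n :: ns, p => n * p + sumW ns (2 * p)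

-- B's enumerate-sum equals the running-power weighted sum
lemma enumSum (segs : List Int) : ∀ (s : Nat),
    ((PySem.List.enumerate segs (s : Int)).map (fun p => p.2 * 2 ^ p.1.toNat)).sum
      = sumW segs (2 ^ s) := by
  induction segs with
  | nil => intro s; simp [PySem.List.enumerate_nil, sumW]
  | cons n ns ih =>
      intro s
      have h1 : ((s : Int) + 1) = ((s + 1 : Nat) : Int) := by push_cast; ring
      rw [PySem.List.enumerate_cons, List.map_cons, List.sum_cons, h1, ih (s + 1)]
      simp only [sumW, Int.toNat_natCast, pow_succ]
      ring

-- a pending run of cur shots contributes cur * p on top of the cur = 0 segmentation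
lemma segShift (codes : List String) : ∀ (cur p : Int),
    sumW (segmentsOf codes cur) p = cur * p + sumW (segmentsOf codes 0) p := by
  induction codes with
  | nil => intro cur p; simp [segmentsOf, sumW]
  | cons code rest ih =>
      intro cur p
      by_cases hC : code = "C"
      · simp only [segmentsOf, hC, String.reduceEq, reduceIte, sumW]
        ring
      · by_cases hS : code = "S"
        · simp only [segmentsOf, hS, String.reduceEq, reduceIte]
          rw [show (0 : Int) + 1 = 1 from rfl, ih (cur + 1) p, ih 1 p]
          ring
        · simp only [segmentsOf, hC, hS, if_false]
          exact ih cur p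

-- invariant of A's fold: starting at (p, t) it returns t plus the weighted segment sum
lemma mainInv (codes : List String) : ∀ (p t : Int), Pre_calc_damage codes →
    (codes.foldl (fun (st : Int × Int) code =>
      if code = "C" then (st.1 * 2, st.2)
      else if code = "S" then (st.1, st.2 + st.1)
      else st) (p, t)).2 = t + sumW (segmentsOf codes 0) p := by
  induction codes with
  | nil => intro p t _; simp [segmentsOf, sumW]
  | cons code rest ih =>
      intro p t hpre
      have hcode := hpre code (List.mem_cons_self ..)
      have hrest : Pre_calc_damage rest := fun c hc => hpre c (List.mem_cons_of_mem _ hc)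
      rcases hcode with hC | hS
      · subst hC
        simp only [List.foldl_cons, String.reduceEq, reduceIte]
        rw [ih (p * 2) t hrest]
        simp only [segmentsOf, String.reduceEq, reduceIte, sumW]
        ring
      · subst hS
        simp only [List.foldl_cons, String.reduceEq, reduceIte]
        rw [ih p (t + p) hrest]
        simp only [segmentsOf, String.reduceEq, reduceIte]
        rw [show (0 : Int) + 1 = 1 from rfl, segShift rest 1 p]
        ring

-- ===== VERDICT (by name: the statement is the Claim_ definition above) =====
theorem calc_damage_spec : Claim_equal_calc_damage := by
  intro codes _ hpre
  unfold Spec_calc_damage calc_damage calc_damage_alt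
  rw [mainInv codes 1 0 hpre]
  have := enumSum (segmentsOf codes 0) 0
  simp only [Nat.cast_zero, pow_zero] at this
  rw [this]
  ring
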